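-- pv_equiv track=rewrite | github.com/ryan-li20/cybersecurity | vigniere cypher/vigniere.py | buckets
-- ===== SOURCE A (Python) =====
-- def buckets(string, key):
--     masterlist = []
--     for letter in key:
--         templist = []
--         masterlist.append(templist)
--     for x in range(len(string)):
--         masterlist[(x%len(key))].append(string[x])
--     return masterlist
-- ===== SOURCE B (Python) =====
-- def buckets(string, key):
--     n = len(key)
--     return [list(string[i::n]) for i in range(n)]
-- ===== Notes on version B (the rewrite author's own statement) =====
-- stated objective: idiomatic
-- what changed: B builds each bucket in one shot as the strided slice string[i::n] instead of distributing characters one by one into pre-built lists via an index-mod loop.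
import Mathlib
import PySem

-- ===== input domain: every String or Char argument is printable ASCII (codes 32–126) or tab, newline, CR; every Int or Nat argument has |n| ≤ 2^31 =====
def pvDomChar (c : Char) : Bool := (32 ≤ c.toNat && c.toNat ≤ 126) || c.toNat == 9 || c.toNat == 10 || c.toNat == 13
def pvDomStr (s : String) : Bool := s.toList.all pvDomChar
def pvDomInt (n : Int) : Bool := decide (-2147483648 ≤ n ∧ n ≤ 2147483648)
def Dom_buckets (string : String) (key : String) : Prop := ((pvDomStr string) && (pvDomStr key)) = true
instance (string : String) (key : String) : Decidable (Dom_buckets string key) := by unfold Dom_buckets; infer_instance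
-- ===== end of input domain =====

-- B replaces A's char-by-char modulo distribution by building each bucket as the strided slice string[i::n] (idiomatic; same cost).

-- ===== PORT A =====
def buckets (string : String) (key : String) : List (List String) :=
  (PySem.List.pyRange 0 (string.toList.length : Int) 1).foldl
    (fun ml x =>
      ml.modify ((PySem.Int.mod x (key.toList.length : Int)).toNat)
        (fun b => b ++ [String.ofList [(PySem.List.pyGet? string.toList x).getD ' ']]))
    (key.toList.foldl (fun ml _letter => ml ++ [([] : List String)]) [])

-- ===== PORT B =====
def buckets_alt (string : String) (key : String) : List (List String) :=
  (PySem.List.pyRange 0 (key.toList.length : Int) 1).map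
    (fun i =>
      ((PySem.List.slice? string.toList (some i) none (key.toList.length : Int)).getD []).map
        (fun c => String.ofList [c]))

-- ===== PRECONDITION & SPEC =====
-- Pre_ excludes only the inputs on which A raises ZeroDivisionError: empty key with non-empty string.
def Pre_buckets (string : String) (key : String) : Prop := key ≠ "" ∨ string = ""
instance (string : String) (key : String) : Decidable (Pre_buckets string key) := by
  unfold Pre_buckets; infer_instance
def pvWitness_buckets : String × String := ("hello", "ab")

def Spec_buckets (string : String) (key : String) (out : List (List String)) : Prop :=
  out = buckets_alt string key
instance (string : String) (key : String) (out : List (List String)) : Decidable (Spec_buckets string key out) := by unfold Spec_buckets; infer_instance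

-- ===== CLAIM (what is proved, stated in full; the proofs are below) =====
def Claim_equal_buckets : Prop := ∀ (string : String) (key : String), Dom_buckets string key → Pre_buckets string key → Spec_buckets string key (buckets string key)

-- ===== LEMMAS AND PROOFS =====

-- the 1-char string A appends for index j
def pvG (s : List Char) (j : Nat) : String := String.ofList [(s[j]?).getD ' ']

-- A's distribution loop maintains: bucket i = the (mapped) indices below m congruent to i mod n
theorem pvA_inv (s : List Char) (n : Nat) (m : Nat) :
    (List.range m).foldl
        (fun ml x => ml.modify (x % n) (fun b => b ++ [pvG s x]))
        (List.replicate n [])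
      = (List.range n).map
          (fun i => ((List.range m).filter (fun x => x % n == i)).map (pvG s)) := by
  induction m with
  | zero => simp
  | succ m ih =>
    rw [List.range_succ, List.foldl_append, ih]
    simp only [List.foldl_cons, List.foldl_nil]
    apply List.ext_getElem
    · simp
    · intro j h1 h2
      have hjn : j < n := by simpa using h2
      rw [List.getElem_modify]
      by_cases hj : m % n = j
      · simp [hj, List.filter_append]
      · have hb : (m % n == j) = false := by simp [hj]
        simp [hj, hb, List.filter_append]

-- k < ceil((L - i)/n) iff the k-th strided index lands below L
theorem pvKF (L i n : Nat) (hn : 0 < n) :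
    ∀ k, k < (L - i + n - 1) / n ↔ i + n * k < L := by
  intro k
  rw [Nat.lt_iff_add_one_le, Nat.le_div_iff_mul_le hn]
  rcases Nat.lt_or_ge i L with h | h
  · obtain ⟨d, hd⟩ : ∃ d, L = i + d + 1 := ⟨L - i - 1, by omega⟩
    subst hd
    constructor
    · intro hk
      have h2 : (k + 1) * n = n * k + n := by ring
      have h3 : i + d + 1 - i + n - 1 = d + n := by omega
      rw [h2, h3] at hk
      omega
    · intro hk
      have h2 : n * k ≤ d := by omega
      have h3 : (k + 1) * n = n * k + n := by ring
      have h4 : i + d + 1 - i + n - 1 = d + n := by omega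
      rw [h3, h4]
      omega
  · have h1 : L - i = 0 := by omega
    rw [h1]
    constructor
    · intro hk
      have : (k + 1) * n ≥ n := by nlinarith
      omega
    · intro hk
      have : n * k ≥ 0 := Nat.zero_le _
      omega

-- count characterization: filter of range by a residue class is a strided map
theorem pvFilter_range_mod (n i : Nat) (hn : 0 < n) (hi : i < n) :
    ∀ L c, (∀ k, k < c ↔ i + n * k < L) →
      (List.range L).filter (fun x => x % n == i)
        = (List.range c).map (fun k => i + n * k) := by
  intro L
  induction L with
  | zero =>
    intro c hc
    have hc0 : c = 0 := by
      by_contra h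
      have h0 := (hc 0).mp (Nat.pos_of_ne_zero h)
      omega
    simp [hc0]
  | succ L ih =>
    intro c hc
    have hdm := Nat.div_add_mod L n
    rw [List.range_succ, List.filter_append]
    by_cases hLi : L % n = i
    · -- L joins bucket i; c = L/n + 1
      have hL : L = n * (L / n) + i := by omega
      have hc' : c = L / n + 1 := by
        have h3 : L / n < c := (hc (L / n)).mpr (by linarith)
        have h4 : ¬ (L / n + 1 < c) := by
          intro h
          have h5 := (hc (L / n + 1)).mp h
          have h6 : n * (L / n + 1) = n * (L / n) + n := by ring
          rw [h6] at h5
          linarith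
        omega
      have hIH : ∀ k, k < L / n ↔ i + n * k < L := by
        intro k
        constructor
        · intro h
          have h2 := (Nat.mul_lt_mul_left hn).mpr h
          linarith [hL]
        · intro h
          exact (Nat.mul_lt_mul_left hn).mp (by linarith [hL])
      rw [ih (L / n) hIH, hc', List.range_succ, List.map_append]
      simp [hLi]
      linarith
    · -- L not in bucket i; same c works for L
      have hb : (L % n == i) = false := by simp [hLi]
      have hIH : ∀ k, k < c ↔ i + n * k < L := by
        intro k
        rw [hc k]
        constructor
        · intro h
          rcases Nat.lt_or_ge (i + n * k) L with h2 | h2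
          · exact h2
          · exfalso
            have h3 : i + n * k = L := by omega
            have h4 : L % n = i := by
              rw [← h3, Nat.add_mul_mod_self_left]
              exact Nat.mod_eq_of_lt hi
            exact hLi h4
        · intro h
          exact Nat.lt_succ_of_lt h
      rw [ih c hIH]
      simp [hb]

-- B's strided slice, spelled out
theorem pvSlice_stride (s : List Char) (i n : Nat) (hn : 0 < n) :
    (PySem.List.slice? s (some (i : Int)) none (n : Int)).getD []
      = (List.range ((s.length - i + n - 1) / n)).map (fun k => (s[i + n * k]?).getD ' ') := by
  have hn0 : ((n : Int) = 0) = False := by simp; omega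
  have hnneg : ((n : Int) < 0) = False := by simp
  have hineg : ((i : Int) < 0) = False := by simp
  simp only [PySem.List.slice?, PySem.List.sliceIndices, hn0, hnneg, hineg,
    if_false]
  have hpos : (0 : Int) < (n : Int) := by exact_mod_cast hn
  rw [if_pos hpos]
  rcases Nat.lt_or_ge i s.length with hiL | hiL
  · -- i < L: start = i, count = ceil((L-i)/n)
    have hmin : min (i : Int) (s.length : Int) = (i : Int) := by
      apply min_eq_left; exact_mod_cast Nat.le_of_lt hiL
    rw [hmin]
    have hlt : ((i : Int) < (s.length : Int)) := by exact_mod_cast hiL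
    rw [if_pos hlt]
    have hcast : ((s.length : Int) - i + n - 1) = ((s.length - i + n - 1 : Nat) : Int) := by
      omega
    rw [hcast, ← Int.natCast_div, Int.toNat_natCast]
    -- each probed index is in bounds, so the filterMap is a map
    rw [List.filterMap_congr (g := fun k => some ((s[i + n * k]?).getD ' '))
      (by
        intro k hk
        have hkc : k < (s.length - i + n - 1) / n := by simpa using hk
        have hib : i + n * k < s.length := (pvKF s.length i n hn k).mp hkc
        have hidx : ((i : Int) + (n : Int) * (k : Int)).toNat = i + n * k := by
          have : ((i : Int) + (n : Int) * (k : Int)) = ((i + n * k : Nat) : Int) := by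
            push_cast; ring
          rw [this, Int.toNat_natCast]
        rw [hidx]
        simp [List.getElem?_eq_getElem hib])]
    rw [show (fun k => some ((s[i + n * k]?).getD ' ')) = some ∘ (fun k => (s[i + n * k]?).getD ' ') from rfl,
      List.filterMap_eq_map]
    rfl
  · -- i ≥ L: empty bucket on both sides
    have hmin : min (i : Int) (s.length : Int) = (s.length : Int) := by
      apply min_eq_right; exact_mod_cast hiL
    rw [hmin]
    have hlt : ¬ ((s.length : Int) < (s.length : Int)) := lt_irrefl _
    rw [if_neg hlt]
    have hL0 : s.length - i = 0 := by omega
    have hc0 : (s.length - i + n - 1) / n = 0 := by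
      rw [hL0]
      exact Nat.div_eq_of_lt (by omega)
    simp [hc0]

theorem buckets_spec : Claim_equal_buckets := by
  intro string key _ hpre
  unfold Spec_buckets buckets buckets_alt
  by_cases hn : 0 < key.toList.length
  · -- general case: n > 0
    rw [PySem.List.pyRange_zero_natCast string.toList.length,
        PySem.List.pyRange_zero_natCast key.toList.length,
        List.foldl_map, List.map_map]
    have hinit : key.toList.foldl (fun ml _letter => ml ++ [([] : List String)]) []
        = List.replicate key.toList.length ([] : List String) := by
      rw [PySem.List.foldl_append_singleton_eq_map (fun _ => ([] : List String)) key.toList []]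
      simp
    rw [hinit]
    have hstep : (fun (ml : List (List String)) (x : Nat) =>
          ml.modify ((PySem.Int.mod (x : Int) (key.toList.length : Int)).toNat)
            (fun b => b ++ [String.ofList [(PySem.List.pyGet? string.toList (x : Int)).getD ' ']]))
        = (fun ml x => ml.modify (x % key.toList.length) (fun b => b ++ [pvG string.toList x])) := by
      funext ml x
      rw [PySem.Int.mod_natCast, Int.toNat_natCast, PySem.List.pyGet?_natCast]
      rfl
    rw [hstep, pvA_inv string.toList key.toList.length string.toList.length]
    apply List.map_congr_left
    intro i hi
    have hin : i < key.toList.length := by simpa using hi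
    rw [Function.comp_apply, pvSlice_stride string.toList i key.toList.length hn,
      pvFilter_range_mod key.toList.length i hn hin string.toList.length
        ((string.toList.length - i + key.toList.length - 1) / key.toList.length)
        (pvKF string.toList.length i key.toList.length hn),
      List.map_map, List.map_map]
    rfl
  · -- n = 0: Pre_ forces string = "", both sides are []
    have hkl : key.toList.length = 0 := by omega
    have hkey : key = "" := by
      have h0 : key.toList = [] := List.length_eq_zero_iff.mp hkl
      simpa using congrArg String.ofList h0
    have hstr : string = "" := by
      rcases hpre with h | h
      · exact absurd hkey h
      · exact h
    subst hkey hstr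
    decide
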